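-- pv_equiv track=rewrite | github.com/alif1979/Test9X | scripts/evaluate/acc_delta_gen/ccheck.py | get_peer_group_nbrs
-- ===== SOURCE A (Python) =====
-- def get_peer_group_nbrs(af_lines):
-- 	peer_groups = ( 'se-acc', 'se-acc-dir', 'se-acc-lpp', 'se-acc-alt', 'se-acc-rr' )
-- 	nbr_lines_list = []
-- 	nbrs = set()
-- 	se_acc_nbrs = set()
-- 	for peer in peer_groups:
-- 		for line in af_lines:
-- 			if line.strip().endswith(f" peer-group {peer}"):
-- 				nbr = line.strip().split()[1]
-- 				nbrs.add(nbr)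
-- 				if peer == 'se-acc':
-- 					se_acc_nbrs.add(nbr)
-- 	#
-- 	for line in af_lines:
-- 		if line.strip().startswith(f"neighbor ") and line.strip().split()[1] in nbrs:
-- 			nbr_lines_list.append(line)
-- 	return (nbr_lines_list, nbrs, se_acc_nbrs)
-- ===== SOURCE B (Python) =====
-- PEER_GROUPS = ('se-acc', 'se-acc-dir', 'se-acc-lpp', 'se-acc-alt', 'se-acc-rr')
--
--
-- def _classify(s):
--     """Index of the peer group a (stripped) line attaches to, or None."""
--     for r, p in enumerate(PEER_GROUPS):
--         if s.endswith(" peer-group " + p):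
--             return r
--     return None
--
--
-- def get_peer_group_nbrs(af_lines):
--     # one pass: bucket the matched neighbor names by peer-group index
--     buckets = [[], [], [], [], []]
--     for line in af_lines:
--         s = line.strip()
--         r = _classify(s)
--         if r is not None:
--             buckets[r].append(s.split()[1])
--     nbrs = set()
--     for b in buckets:
--         nbrs.update(b)
--     se_acc_nbrs = set(buckets[0])
--     nbr_lines_list = [line for line in af_lines
--                       if line.strip().startswith("neighbor ")
--                       and line.strip().split()[1] in nbrs]
--     return (nbr_lines_list, nbrs, se_acc_nbrs)
-- ===== Notes on version B (the rewrite author's own statement) =====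
-- stated objective: alternative
-- what changed: A rescans af_lines once per each of the five peer groups to build the neighbor sets; B makes a single classifying pass that buckets each line's neighbor name by the peer group whose ' peer-group <X>' suffix it carries, then assembles the sets from the buckets.
import Mathlib
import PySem

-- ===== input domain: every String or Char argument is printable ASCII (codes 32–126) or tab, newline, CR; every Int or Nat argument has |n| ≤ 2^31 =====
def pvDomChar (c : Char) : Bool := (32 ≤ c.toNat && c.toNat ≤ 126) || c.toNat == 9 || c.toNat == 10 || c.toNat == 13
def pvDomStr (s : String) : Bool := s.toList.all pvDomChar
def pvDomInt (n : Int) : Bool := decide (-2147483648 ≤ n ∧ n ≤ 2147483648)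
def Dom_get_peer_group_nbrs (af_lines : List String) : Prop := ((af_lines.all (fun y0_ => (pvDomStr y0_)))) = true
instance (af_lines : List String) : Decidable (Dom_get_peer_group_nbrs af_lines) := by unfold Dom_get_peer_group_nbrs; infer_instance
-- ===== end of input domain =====

-- B replaces A's five full scans of af_lines (one scan per peer group) with a single
-- classifying pass that buckets matched neighbor names by peer group (objective: alternative single-pass decomposition).

-- ===== PORT A =====
-- literal transliteration of A; the guarded `split()[1]` always exists (a matched or
-- neighbor line has at least 2 tokens), so the `.getD ""` default is never taken.
def get_peer_group_nbrs (af_lines : List String) : List String × List String × List String :=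
  let peer_groups : List String := ["se-acc", "se-acc-dir", "se-acc-lpp", "se-acc-alt", "se-acc-rr"]
  let st :=
    peer_groups.foldl (fun (st : PySem.Set String × PySem.Set String) peer =>
      af_lines.foldl (fun (st : PySem.Set String × PySem.Set String) line =>
        if PySem.Str.endswith (PySem.Str.strip line) (" peer-group " ++ peer) then
          let nbr := (PySem.List.pyGet? (PySem.Str.split₀ (PySem.Str.strip line)) 1).getD ""
          (PySem.Set.add st.1 nbr,
           if peer == "se-acc" then PySem.Set.add st.2 nbr else st.2)
        else st) st) (([], []) : PySem.Set String × PySem.Set String)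
  let nbr_lines_list :=
    af_lines.foldl (fun (acc : List String) line =>
      if PySem.Str.startswith (PySem.Str.strip line) "neighbor " &&
         PySem.Set.contains st.1
           ((PySem.List.pyGet? (PySem.Str.split₀ (PySem.Str.strip line)) 1).getD "") then
        acc ++ [line]
      else acc) []
  (nbr_lines_list, st.1, st.2)

-- ===== PORT B =====
def pvPeerGroupsB : List String := ["se-acc", "se-acc-dir", "se-acc-lpp", "se-acc-alt", "se-acc-rr"]

-- _classify: index of the first peer group whose " peer-group <p>" suffix the stripped line carries
def pvClassifyGo (s : String) : List (Int × String) → Option Int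
  | [] => none
  | (r, p) :: rest =>
      if PySem.Str.endswith s (" peer-group " ++ p) then some r else pvClassifyGo s rest

def pvClassify (s : String) : Option Int :=
  pvClassifyGo s (PySem.List.enumerate pvPeerGroupsB)

def get_peer_group_nbrs_alt (af_lines : List String) : List String × List String × List String :=
  let buckets :=
    af_lines.foldl (fun (b : List (List String)) line =>
      let s := PySem.Str.strip line
      match pvClassify s with
      | some r =>
          PySem.List.pySetD b r
            (PySem.List.pyGetD b r [] ++ [(PySem.List.pyGet? (PySem.Str.split₀ s) 1).getD ""])
      | none => b) [[], [], [], [], []]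
  let nbrs := buckets.foldl (fun (acc : PySem.Set String) bkt => PySem.Set.update acc bkt) []
  let se_acc_nbrs : PySem.Set String := PySem.Set.ofList (PySem.List.pyGetD buckets 0 [])
  let nbr_lines_list := af_lines.filter (fun line =>
      PySem.Str.startswith (PySem.Str.strip line) "neighbor " &&
      PySem.Set.contains nbrs
        ((PySem.List.pyGet? (PySem.Str.split₀ (PySem.Str.strip line)) 1).getD ""))
  (nbr_lines_list, nbrs, se_acc_nbrs)

-- ===== PRECONDITION & SPEC =====
def Spec_get_peer_group_nbrs (af_lines : List String) (out : List String × List String × List String) : Prop := out = get_peer_group_nbrs_alt af_lines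
instance (af_lines : List String) (out : List String × List String × List String) : Decidable (Spec_get_peer_group_nbrs af_lines out) := by unfold Spec_get_peer_group_nbrs; infer_instance

-- ===== CLAIM (what is proved, stated in full; the proofs are below) =====
def Claim_equal_get_peer_group_nbrs : Prop := ∀ (af_lines : List String), Dom_get_peer_group_nbrs af_lines → Spec_get_peer_group_nbrs af_lines (get_peer_group_nbrs af_lines)

-- ===== LEMMAS AND PROOFS =====

-- the per-peer suffix test on an (already stripped) string
def pvE (p s : String) : Bool := PySem.Str.endswith s (" peer-group " ++ p)

-- the neighbor name a matched line contributes
def pvNbr (line : String) : String :=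
  (PySem.List.pyGet? (PySem.Str.split₀ (PySem.Str.strip line)) 1).getD ""

-- the neighbor names contributed by the lines matching peer group p, in line order
def pvM (p : String) (lines : List String) : List String :=
  (lines.filter (fun line => pvE p (PySem.Str.strip line))).map pvNbr

-- a string cannot end with two suffix-incomparable words
theorem pv_excl {s : String} (w1 w2 : String)
    (h1 : ¬ w1.toList <:+ w2.toList) (h2 : ¬ w2.toList <:+ w1.toList)
    (hs : PySem.Str.endswith s w1 = true) : PySem.Str.endswith s w2 = false := by
  simp only [PySem.Str.endswith_eq, PySem.Chars.endswith_iff] at hs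
  by_contra h
  rw [Bool.not_eq_false] at h
  simp only [PySem.Str.endswith_eq, PySem.Chars.endswith_iff] at h
  rcases List.suffix_or_suffix_of_suffix hs h with c | c
  · exact h1 c
  · exact h2 c

theorem pvE_excl (p q : String) {s : String}
    (h1 : ¬ (" peer-group " ++ p).toList <:+ (" peer-group " ++ q).toList)
    (h2 : ¬ (" peer-group " ++ q).toList <:+ (" peer-group " ++ p).toList)
    (h : pvE p s = true) : pvE q s = false :=
  pv_excl _ _ h1 h2 h

-- pvClassify written as a cascade of the five suffix tests
theorem pv_classify_eq (s : String) :
    pvClassify s =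
      (if pvE "se-acc" s then some 0 else if pvE "se-acc-dir" s then some 1
       else if pvE "se-acc-lpp" s then some 2 else if pvE "se-acc-alt" s then some 3
       else if pvE "se-acc-rr" s then some 4 else none) := by
  simp [pvClassify, pvPeerGroupsB, PySem.List.enumerate, pvClassifyGo, pvE]
  split_ifs <;> rfl

-- B's bucketing pass, characterised per peer group
set_option maxHeartbeats 1000000 in
theorem pv_buckets (lines : List String) (b0 b1 b2 b3 b4 : List String) :
    lines.foldl (fun (b : List (List String)) line =>
      let s := PySem.Str.strip line
      match pvClassify s with
      | some r =>
          PySem.List.pySetD b r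
            (PySem.List.pyGetD b r [] ++ [(PySem.List.pyGet? (PySem.Str.split₀ s) 1).getD ""])
      | none => b) [b0, b1, b2, b3, b4]
    = [b0 ++ pvM "se-acc" lines, b1 ++ pvM "se-acc-dir" lines, b2 ++ pvM "se-acc-lpp" lines,
       b3 ++ pvM "se-acc-alt" lines, b4 ++ pvM "se-acc-rr" lines] := by
  have hfun : (fun (b : List (List String)) line =>
      let s := PySem.Str.strip line
      match pvClassify s with
      | some r =>
          PySem.List.pySetD b r
            (PySem.List.pyGetD b r [] ++ [(PySem.List.pyGet? (PySem.Str.split₀ s) 1).getD ""])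
      | none => b)
      = (fun (b : List (List String)) line =>
        if pvE "se-acc" (PySem.Str.strip line) then
          PySem.List.pySetD b 0 (PySem.List.pyGetD b 0 [] ++ [pvNbr line])
        else if pvE "se-acc-dir" (PySem.Str.strip line) then
          PySem.List.pySetD b 1 (PySem.List.pyGetD b 1 [] ++ [pvNbr line])
        else if pvE "se-acc-lpp" (PySem.Str.strip line) then
          PySem.List.pySetD b 2 (PySem.List.pyGetD b 2 [] ++ [pvNbr line])
        else if pvE "se-acc-alt" (PySem.Str.strip line) then
          PySem.List.pySetD b 3 (PySem.List.pyGetD b 3 [] ++ [pvNbr line])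
        else if pvE "se-acc-rr" (PySem.Str.strip line) then
          PySem.List.pySetD b 4 (PySem.List.pyGetD b 4 [] ++ [pvNbr line])
        else b) := by
    funext b line
    show (match pvClassify (PySem.Str.strip line) with
      | some r =>
          PySem.List.pySetD b r
            (PySem.List.pyGetD b r [] ++ [(PySem.List.pyGet? (PySem.Str.split₀ (PySem.Str.strip line)) 1).getD ""])
      | none => b) = _
    rw [pv_classify_eq]
    split_ifs <;> rfl
  rw [hfun]
  induction lines generalizing b0 b1 b2 b3 b4 with
  | nil => rw [List.foldl_nil]; simp [pvM]
  | cons l ls ih =>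
    rw [List.foldl_cons]
    by_cases h0 : pvE "se-acc" (PySem.Str.strip l) = true
    · have e1 := pvE_excl "se-acc" "se-acc-dir" (by decide) (by decide) h0
      have e2 := pvE_excl "se-acc" "se-acc-lpp" (by decide) (by decide) h0
      have e3 := pvE_excl "se-acc" "se-acc-alt" (by decide) (by decide) h0
      have e4 := pvE_excl "se-acc" "se-acc-rr" (by decide) (by decide) h0
      simp only [h0, if_true]
      rw [show PySem.List.pySetD [b0,b1,b2,b3,b4] 0
            (PySem.List.pyGetD [b0,b1,b2,b3,b4] 0 [] ++ [pvNbr l]) = [b0 ++ [pvNbr l], b1, b2, b3, b4] by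
        simp [PySem.List.pySetD, PySem.List.pySet?, PySem.List.pyGetD, PySem.List.pyGet?, PySem.List.pyIdx?]]
      rw [ih]
      simp [pvM, h0, e1, e2, e3, e4]
    · by_cases h1 : pvE "se-acc-dir" (PySem.Str.strip l) = true
      · have e2 := pvE_excl "se-acc-dir" "se-acc-lpp" (by decide) (by decide) h1
        have e3 := pvE_excl "se-acc-dir" "se-acc-alt" (by decide) (by decide) h1
        have e4 := pvE_excl "se-acc-dir" "se-acc-rr" (by decide) (by decide) h1
        simp only [h0, h1, if_true, Bool.false_eq_true, if_false]
        rw [show PySem.List.pySetD [b0,b1,b2,b3,b4] 1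
              (PySem.List.pyGetD [b0,b1,b2,b3,b4] 1 [] ++ [pvNbr l]) = [b0, b1 ++ [pvNbr l], b2, b3, b4] by
          simp [PySem.List.pySetD, PySem.List.pySet?, PySem.List.pyGetD, PySem.List.pyGet?, PySem.List.pyIdx?]]
        rw [ih]
        simp [pvM, h0, h1, e2, e3, e4]
      · by_cases h2 : pvE "se-acc-lpp" (PySem.Str.strip l) = true
        · have e3 := pvE_excl "se-acc-lpp" "se-acc-alt" (by decide) (by decide) h2
          have e4 := pvE_excl "se-acc-lpp" "se-acc-rr" (by decide) (by decide) h2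
          simp only [h0, h1, h2, if_true, Bool.false_eq_true, if_false]
          rw [show PySem.List.pySetD [b0,b1,b2,b3,b4] 2
                (PySem.List.pyGetD [b0,b1,b2,b3,b4] 2 [] ++ [pvNbr l]) = [b0, b1, b2 ++ [pvNbr l], b3, b4] by
            simp [PySem.List.pySetD, PySem.List.pySet?, PySem.List.pyGetD, PySem.List.pyGet?, PySem.List.pyIdx?]]
          rw [ih]
          simp [pvM, h0, h1, h2, e3, e4]
        · by_cases h3 : pvE "se-acc-alt" (PySem.Str.strip l) = true
          · have e4 := pvE_excl "se-acc-alt" "se-acc-rr" (by decide) (by decide) h3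
            simp only [h0, h1, h2, h3, if_true, Bool.false_eq_true, if_false]
            rw [show PySem.List.pySetD [b0,b1,b2,b3,b4] 3
                  (PySem.List.pyGetD [b0,b1,b2,b3,b4] 3 [] ++ [pvNbr l]) = [b0, b1, b2, b3 ++ [pvNbr l], b4] by
              simp [PySem.List.pySetD, PySem.List.pySet?, PySem.List.pyGetD, PySem.List.pyGet?, PySem.List.pyIdx?]]
            rw [ih]
            simp [pvM, h0, h1, h2, h3, e4]
          · by_cases h4 : pvE "se-acc-rr" (PySem.Str.strip l) = true
            · simp only [h0, h1, h2, h3, h4, if_true, Bool.false_eq_true, if_false]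
              rw [show PySem.List.pySetD [b0,b1,b2,b3,b4] 4
                    (PySem.List.pyGetD [b0,b1,b2,b3,b4] 4 [] ++ [pvNbr l]) = [b0, b1, b2, b3, b4 ++ [pvNbr l]] by
                simp [PySem.List.pySetD, PySem.List.pySet?, PySem.List.pyGetD, PySem.List.pyGet?, PySem.List.pyIdx?]]
              rw [ih]
              simp [pvM, h0, h1, h2, h3, h4]
            · simp only [h0, h1, h2, h3, h4, Bool.false_eq_true, if_false]
              rw [ih]
              simp [pvM, h0, h1, h2, h3, h4]

-- A's pass for one peer group, characterised
-- Set.update through a cons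
theorem pv_update_cons (s : PySem.Set String) (x : String) (xs : List String) :
    PySem.Set.update s (x :: xs) = PySem.Set.update (PySem.Set.add s x) xs := by
  simp [PySem.Set.update]

-- A's pass for one peer group, characterised
set_option maxHeartbeats 1000000 in
theorem pv_pass (p : String) (lines : List String) (n s : PySem.Set String) :
    lines.foldl (fun (st : PySem.Set String × PySem.Set String) line =>
        if PySem.Str.endswith (PySem.Str.strip line) (" peer-group " ++ p) then
          let nbr := (PySem.List.pyGet? (PySem.Str.split₀ (PySem.Str.strip line)) 1).getD ""
          (PySem.Set.add st.1 nbr,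
           if p == "se-acc" then PySem.Set.add st.2 nbr else st.2)
        else st) (n, s)
    = (PySem.Set.update n (pvM p lines),
       if p == "se-acc" then PySem.Set.update s (pvM p lines) else s) := by
  induction lines generalizing n s with
  | nil => rw [List.foldl_nil]; simp [pvM, PySem.Set.update]
  | cons l ls ih =>
    rw [List.foldl_cons]
    by_cases h : PySem.Str.endswith (PySem.Str.strip l) (" peer-group " ++ p) = true
    · have hE : pvE p (PySem.Str.strip l) = true := h
      simp only [h, if_true]
      rw [ih, show pvM p (l :: ls) = pvNbr l :: pvM p ls from by
        simp only [pvM, List.filter_cons, hE, if_true, List.map_cons]]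
      rw [pv_update_cons]
      by_cases hp : (p == "se-acc") = true <;> simp [hp, pvNbr]
    · have hB : PySem.Str.endswith (PySem.Str.strip l) (" peer-group " ++ p) = false :=
        Bool.eq_false_iff.mpr h
      have hE : pvE p (PySem.Str.strip l) = false := hB
      simp only [hB, Bool.false_eq_true, if_false]
      rw [ih]
      simp only [pvM, List.filter_cons, hE, Bool.false_eq_true, if_false]

-- the peer-group neighbor set that both programs build
def pvNbrs (lines : List String) : PySem.Set String :=
  PySem.Set.update (PySem.Set.update (PySem.Set.update (PySem.Set.update
    (PySem.Set.update [] (pvM "se-acc" lines)) (pvM "se-acc-dir" lines))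
    (pvM "se-acc-lpp" lines)) (pvM "se-acc-alt" lines)) (pvM "se-acc-rr" lines)

-- A's whole peer-group double loop, characterised
set_option maxHeartbeats 2000000 in
theorem pv_setsA (af_lines : List String) :
    (["se-acc", "se-acc-dir", "se-acc-lpp", "se-acc-alt", "se-acc-rr"] : List String).foldl
      (fun (st : PySem.Set String × PySem.Set String) peer =>
        af_lines.foldl (fun (st : PySem.Set String × PySem.Set String) line =>
          if PySem.Str.endswith (PySem.Str.strip line) (" peer-group " ++ peer) then
            let nbr := (PySem.List.pyGet? (PySem.Str.split₀ (PySem.Str.strip line)) 1).getD ""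
            (PySem.Set.add st.1 nbr,
             if peer == "se-acc" then PySem.Set.add st.2 nbr else st.2)
          else st) st) (([], []) : PySem.Set String × PySem.Set String)
    = (pvNbrs af_lines, PySem.Set.ofList (pvM "se-acc" af_lines)) := by
  rw [List.foldl_cons, List.foldl_cons, List.foldl_cons, List.foldl_cons, List.foldl_cons,
      List.foldl_nil]
  rw [pv_pass, pv_pass, pv_pass, pv_pass, pv_pass]
  simp [pvNbrs, PySem.Set.update_nil_left]

-- ===== VERDICT (by name: the statement is the Claim_ definition above) =====
set_option maxHeartbeats 4000000 in
theorem get_peer_group_nbrs_spec : Claim_equal_get_peer_group_nbrs := by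
  intro af_lines _
  show get_peer_group_nbrs af_lines = get_peer_group_nbrs_alt af_lines
  simp only [get_peer_group_nbrs, get_peer_group_nbrs_alt, pv_setsA, pv_buckets]
  rw [PySem.List.foldl_append_if_eq_filter]
  simp only [List.nil_append, List.foldl_cons, List.foldl_nil]
  simp only [← pvNbrs.eq_def]
  simp [PySem.List.pyGetD, PySem.List.pyGet?, PySem.List.pyIdx?]
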